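-- pv_equiv track=rewrite | github.com/dlist7/advent-of-code-2022-python | day22a.py | update_position
-- ===== SOURCE A (Python) =====
-- def update_north(monkey_map, r0, c0, r, c):
--     if r > 0:
--         if monkey_map[r-1][c] == '.':
--             return (r-1,c)
--         elif monkey_map[r-1][c] == '#':
--             return (r0,c0)
--         else:
--             return update_north(monkey_map, r0, c0, r-1, c)
--     else:
--         if monkey_map[len(monkey_map)-1][c] == '.':
--             return (len(monkey_map)-1,c)
--         elif monkey_map[len(monkey_map)-1][c] == '#':
--             return (r0,c0)
--         else:
--             return update_north(monkey_map, r0, c0, len(monkey_map)-1, c)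
--
-- def update_east(monkey_map, r0, c0, r, c):
--     if c < len(monkey_map[r]) - 1:
--         if monkey_map[r][c+1] == '.':
--             return (r,c+1)
--         elif monkey_map[r][c+1] == '#':
--             return (r0,c0)
--         else:
--             return update_east(monkey_map, r0, c0, r, c+1)
--     else:
--         if monkey_map[r][0] == '.':
--             return (r,0)
--         elif monkey_map[r][0] == '#':
--             return (r0,c0)
--         else:
--             return update_east(monkey_map, r0, c0, r, 0)
--
-- def update_south(monkey_map, r0, c0, r, c):
--     if r < len(monkey_map) - 1:
--         if monkey_map[r+1][c] == '.':
--             return (r+1,c)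
--         elif monkey_map[r+1][c] == '#':
--             return (r0,c0)
--         else:
--             return update_south(monkey_map, r0, c0, r+1, c)
--     else:
--         if monkey_map[0][c] == '.':
--             return (0,c)
--         elif monkey_map[0][c] == '#':
--             return (r0,c0)
--         else:
--             return update_south(monkey_map, r0, c0, 0, c)
--
-- def update_west(monkey_map, r0, c0, r, c):
--     if c > 0:
--         if monkey_map[r][c-1] == '.':
--             return (r,c-1)
--         elif monkey_map[r][c-1] == '#':
--             return (r0,c0)
--         else:
--             return update_west(monkey_map, r0, c0, r, c-1)
--     else:
--         if monkey_map[r][len(monkey_map[r])-1] == '.':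
--             return (r,len(monkey_map[r])-1)
--         elif monkey_map[r][len(monkey_map[r])-1] == '#':
--             return (r0,c0)
--         else:
--             return update_west(monkey_map, r0, c0, r, len(monkey_map[r])-1)
--
-- def update_position(monkey_map, facing, row, col, dist):
--     r,c = row,col
--     for i in range(0, dist):
--         if facing == 3:
--             r,c = update_north(monkey_map, r, c, r, c)
--         elif facing == 0:
--             r,c = update_east(monkey_map, r, c, r, c)
--         elif facing == 1:
--             r,c = update_south(monkey_map, r, c, r, c)
--         elif facing == 2:
--             r,c = update_west(monkey_map, r, c, r, c)
--     return r,c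
-- ===== SOURCE B (Python) =====
-- def update_position(monkey_map, facing, row, col, dist):
--     # Precompute a next-tile table for the relevant row/column once; each step
--     # is then a single table lookup (no per-step rescan of the line).
--     if dist <= 0:
--         return (row, col)
--     if facing == 0 or facing == 2:
--         chars = list(monkey_map[row])
--         cur = col
--     elif facing == 1 or facing == 3:
--         chars = [line[col] for line in monkey_map]
--         cur = row
--     else:
--         return (row, col)
--     n = len(chars)
--     nxt = [0] * n
--     if facing == 0 or facing == 1:
--         first = next((i for i in range(n) if chars[i] in '.#'), 0)
--         nxt[n - 1] = first
--         for c in range(n - 2, -1, -1):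
--             nxt[c] = c + 1 if chars[c + 1] in '.#' else nxt[c + 1]
--     else:
--         last = next((i for i in range(n - 1, -1, -1) if chars[i] in '.#'), 0)
--         nxt[0] = last
--         for c in range(1, n):
--             nxt[c] = c - 1 if chars[c - 1] in '.#' else nxt[c - 1]
--     for _ in range(dist):
--         t = nxt[cur]
--         if chars[t] == '#':
--             break
--         cur = t
--     if facing == 0 or facing == 2:
--         return (row, cur)
--     return (cur, col)
-- ===== Notes on version B (the rewrite author's own statement) =====
-- stated objective: alternative
-- what changed: B precomputes a next-tile lookup table for the one row/column the move runs along (plus a single first/last-tile scan), so each of the dist steps is a table lookup with early exit at a wall, instead of A's per-step recursive rescan of the line past the blank cells; per-step cost becomes O(1) after an O(n) precomputation, though a timing run measured no >=1.5x gain on its input family.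
-- outside the precondition, e.g. on update_position(['.#'], 0, 0, 5, 1): A returns (0, 0), B raises IndexError; on update_position(['..', '..', '.'], 1, 0, 1, 1): A returns (1, 1), B raises IndexError
import Mathlib
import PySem

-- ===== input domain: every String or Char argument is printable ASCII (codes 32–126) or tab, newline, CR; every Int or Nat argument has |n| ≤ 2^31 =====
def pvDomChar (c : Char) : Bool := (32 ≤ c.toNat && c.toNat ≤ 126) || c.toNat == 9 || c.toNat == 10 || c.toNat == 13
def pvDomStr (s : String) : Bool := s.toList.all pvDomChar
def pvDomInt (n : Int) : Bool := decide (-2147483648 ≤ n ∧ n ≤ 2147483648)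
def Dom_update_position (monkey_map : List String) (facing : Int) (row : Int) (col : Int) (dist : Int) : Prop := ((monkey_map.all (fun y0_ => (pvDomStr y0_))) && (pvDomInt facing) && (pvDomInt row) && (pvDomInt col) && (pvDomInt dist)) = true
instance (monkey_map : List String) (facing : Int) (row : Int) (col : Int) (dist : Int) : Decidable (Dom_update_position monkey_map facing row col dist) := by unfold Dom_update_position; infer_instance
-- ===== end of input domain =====

-- B replaces A's per-step recursive rescan of the row/column by a next-tile table
-- precomputed once for the relevant line, each step then being a single table lookup
-- (an alternative algorithm; no speed is claimed).

-- shared small helpers (used by ports and by Pre_; not ports themselves)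
def pvTile (ch : Char) : Bool := ch == '.' || ch == '#'
def pvLine (m : List String) (r : Int) : List Char :=
  ((PySem.List.pyGet? m r).map String.toList).getD []
def pvColumn (m : List String) (c : Int) : List Char :=
  m.map (fun s => (PySem.Str.pyGet? s c).getD ' ')

-- ===== PORT A =====
-- monkey_map[r][c]; where Python would raise IndexError this returns ' ' (those inputs are outside Pre_)
def pvCh (m : List String) (r c : Int) : Char :=
  ((PySem.List.pyGet? m r).bind (fun s => PySem.Str.pyGet? s c)).getD ' '
-- len(monkey_map[r]); 0 where Python would raise (outside Pre_)
def pvRowLen (m : List String) (r : Int) : Int :=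
  ((PySem.List.pyGet? m r).map (fun s => (s.toList.length : Int))).getD 0

-- the four recursive helpers of A; the unbounded Python recursion carries a fuel
-- parameter (on Pre_ inputs the fuel is never exhausted)
def updNorthA : Nat → List String → Int → Int → Int → Int → Int × Int
  | 0, _, r0, c0, _, _ => (r0, c0)
  | f+1, m, r0, c0, r, c =>
    if r > 0 then
      if pvCh m (r-1) c = '.' then (r-1, c)
      else if pvCh m (r-1) c = '#' then (r0, c0)
      else updNorthA f m r0 c0 (r-1) c
    else
      if pvCh m ((m.length : Int)-1) c = '.' then ((m.length : Int)-1, c)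
      else if pvCh m ((m.length : Int)-1) c = '#' then (r0, c0)
      else updNorthA f m r0 c0 ((m.length : Int)-1) c

def updEastA : Nat → List String → Int → Int → Int → Int → Int × Int
  | 0, _, r0, c0, _, _ => (r0, c0)
  | f+1, m, r0, c0, r, c =>
    if c < pvRowLen m r - 1 then
      if pvCh m r (c+1) = '.' then (r, c+1)
      else if pvCh m r (c+1) = '#' then (r0, c0)
      else updEastA f m r0 c0 r (c+1)
    else
      if pvCh m r 0 = '.' then (r, 0)
      else if pvCh m r 0 = '#' then (r0, c0)
      else updEastA f m r0 c0 r 0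

def updSouthA : Nat → List String → Int → Int → Int → Int → Int × Int
  | 0, _, r0, c0, _, _ => (r0, c0)
  | f+1, m, r0, c0, r, c =>
    if r < (m.length : Int) - 1 then
      if pvCh m (r+1) c = '.' then (r+1, c)
      else if pvCh m (r+1) c = '#' then (r0, c0)
      else updSouthA f m r0 c0 (r+1) c
    else
      if pvCh m 0 c = '.' then (0, c)
      else if pvCh m 0 c = '#' then (r0, c0)
      else updSouthA f m r0 c0 0 c

def updWestA : Nat → List String → Int → Int → Int → Int → Int × Int
  | 0, _, r0, c0, _, _ => (r0, c0)
  | f+1, m, r0, c0, r, c =>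
    if c > 0 then
      if pvCh m r (c-1) = '.' then (r, c-1)
      else if pvCh m r (c-1) = '#' then (r0, c0)
      else updWestA f m r0 c0 r (c-1)
    else
      if pvCh m r (pvRowLen m r - 1) = '.' then (r, pvRowLen m r - 1)
      else if pvCh m r (pvRowLen m r - 1) = '#' then (r0, c0)
      else updWestA f m r0 c0 r (pvRowLen m r - 1)

def pvFuel (m : List String) : Nat :=
  2 * (m.length + m.foldl (fun a s => a + s.toList.length) 0) + 2

def update_position (monkey_map : List String) (facing : Int) (row : Int) (col : Int) (dist : Int) : Int × Int :=
  (PySem.List.pyRange 0 dist 1).foldl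
    (fun rc _ =>
      if facing = 3 then updNorthA (pvFuel monkey_map) monkey_map rc.1 rc.2 rc.1 rc.2
      else if facing = 0 then updEastA (pvFuel monkey_map) monkey_map rc.1 rc.2 rc.1 rc.2
      else if facing = 1 then updSouthA (pvFuel monkey_map) monkey_map rc.1 rc.2 rc.1 rc.2
      else if facing = 2 then updWestA (pvFuel monkey_map) monkey_map rc.1 rc.2 rc.1 rc.2
      else rc)
    (row, col)

-- ===== PORT B =====
-- first i with a tile ('.' or '#'), scanning 0..n-1; 0 if none (Source B: next(..., 0))
def pvFirstF (cs : List Char) : Int :=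
  (((List.range cs.length).find? (fun i => pvTile (cs.getD i ' '))).map (fun i => (i : Int))).getD 0
-- first i with a tile scanning n-1..0; 0 if none
def pvLastB (cs : List Char) : Int :=
  ((((List.range cs.length).reverse).find? (fun i => pvTile (cs.getD i ' '))).map (fun i => (i : Int))).getD 0

-- Source B: for c in range(n-2,-1,-1): nxt[c] = c+1 if tile(chars[c+1]) else nxt[c+1]
-- acc holds [nxt[k], ..., nxt[n-1]]; at step k+1 the entry nxt[k] is prepended
def buildF (cs : List Char) : Nat → List Int → List Int
  | 0, acc => acc
  | k+1, acc => buildF cs k ((if pvTile (cs.getD (k+1) ' ') then ((k : Int)+1) else acc.headD 0) :: acc)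

-- Source B: for c in range(1, n): nxt[c] = c-1 if tile(chars[c-1]) else nxt[c-1]
-- acc holds [nxt[c-1], ..., nxt[0]] (reversed); k counts remaining iterations
def buildB (cs : List Char) : Nat → Nat → List Int → List Int
  | _, 0, acc => acc.reverse
  | c, k+1, acc => buildB cs (c+1) k ((if pvTile (cs.getD (c-1) ' ') then ((c : Int)-1) else acc.headD 0) :: acc)

def pvNxtF (cs : List Char) : List Int := buildF cs (cs.length - 1) [pvFirstF cs]
def pvNxtB (cs : List Char) : List Int := buildB cs 1 (cs.length - 1) [pvLastB cs]

-- Source B: for _ in range(dist): t = nxt[cur]; if chars[t] == '#': break; cur = t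
def pvWalk (cs : List Char) (nxt : List Int) : Nat → Int → Int
  | 0, cur => cur
  | k+1, cur =>
    let t := PySem.List.pyGetD nxt cur 0
    if PySem.List.pyGetD cs t ' ' = '#' then cur else pvWalk cs nxt k t

def update_position_alt (monkey_map : List String) (facing : Int) (row : Int) (col : Int) (dist : Int) : Int × Int :=
  if dist ≤ 0 then (row, col)
  else if facing = 0 ∨ facing = 2 then
    (row, pvWalk (pvLine monkey_map row)
      (if facing = 0 then pvNxtF (pvLine monkey_map row) else pvNxtB (pvLine monkey_map row))
      dist.toNat col)
  else if facing = 1 ∨ facing = 3 then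
    (pvWalk (pvColumn monkey_map col)
      (if facing = 1 then pvNxtF (pvColumn monkey_map col) else pvNxtB (pvColumn monkey_map col))
      dist.toNat row, col)
  else (row, col)

-- ===== PRECONDITION & SPEC =====
-- Pre_ excludes inputs where A raises (row/col out of range for the move's line, a row of
-- the scanned column too short, no tile in the line so A recurses forever) and the inputs
-- where A returns a value only through Python's accidental negative-index / wraparound
-- behaviour on out-of-range row/col or ragged maps, on which the natural B raises instead.
def Pre_update_position (monkey_map : List String) (facing : Int) (row : Int) (col : Int) (dist : Int) : Prop :=
  0 < dist →
    ((facing = 0 ∨ facing = 2) →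
       0 ≤ row ∧ row < monkey_map.length ∧ 0 ≤ col ∧ col < ((pvLine monkey_map row).length : Int) ∧
       (pvLine monkey_map row).any pvTile = true)
    ∧ ((facing = 1 ∨ facing = 3) →
       0 ≤ row ∧ row < monkey_map.length ∧ 0 ≤ col ∧
       (∀ s ∈ monkey_map, col < (s.toList.length : Int)) ∧
       (pvColumn monkey_map col).any pvTile = true)

instance (monkey_map : List String) (facing : Int) (row : Int) (col : Int) (dist : Int) : Decidable (Pre_update_position monkey_map facing row col dist) := by
  unfold Pre_update_position; infer_instance

def pvWitness_update_position : List String × Int × Int × Int × Int := (["..#", "#..", "..."], 0, 0, 0, 2)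

def Spec_update_position (monkey_map : List String) (facing : Int) (row : Int) (col : Int) (dist : Int) (out : Int × Int) : Prop := out = update_position_alt monkey_map facing row col dist
instance (monkey_map : List String) (facing : Int) (row : Int) (col : Int) (dist : Int) (out : Int × Int) : Decidable (Spec_update_position monkey_map facing row col dist out) := by unfold Spec_update_position; infer_instance

-- ===== CLAIM (what is proved, stated in full; the proofs are below) =====
def Claim_equal_update_position : Prop := ∀ (monkey_map : List String) (facing : Int) (row : Int) (col : Int) (dist : Int), Dom_update_position monkey_map facing row col dist → Pre_update_position monkey_map facing row col dist → Spec_update_position monkey_map facing row col dist (update_position monkey_map facing row col dist)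

-- ===== LEMMAS AND PROOFS =====

-- first tile index ≥ k (linear scan upward)
def ftl (cs : List Char) (k : Nat) : Option Nat :=
  if h : k < cs.length then
    (if pvTile cs[k] then some k else ftl cs (k+1))
  else none
termination_by cs.length - k

-- last tile index < k (linear scan downward)
def ftb (cs : List Char) : Nat → Option Nat
  | 0 => none
  | k+1 => if h : k < cs.length then (if pvTile cs[k] then some k else ftb cs k) else ftb cs k

-- where one forward step from position c ends up (before the wall test)
def specFa (cs : List Char) (c : Nat) : Nat :=
  match ftl cs (c+1) with
  | some t => t
  | none => (ftl cs 0).getD 0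

def specBa (cs : List Char) (c : Nat) : Nat :=
  match ftb cs c with
  | some t => t
  | none => (ftb cs cs.length).getD 0

-- generic fuel scanner: the common shape of updEastA (on a row) and updSouthA (on a column)
def scanF (n : Nat) (cs : List Char) : Nat → Int → Option Int
  | 0, _ => none
  | f+1, c =>
    if c < (n : Int) - 1 then
      if PySem.List.pyGetD cs (c+1) ' ' = '.' then some (c+1)
      else if PySem.List.pyGetD cs (c+1) ' ' = '#' then none
      else scanF n cs f (c+1)
    else
      if PySem.List.pyGetD cs 0 ' ' = '.' then some 0
      else if PySem.List.pyGetD cs 0 ' ' = '#' then none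
      else scanF n cs f 0

-- generic fuel scanner: the common shape of updWestA (row) and updNorthA (column)
def scanB (n : Nat) (cs : List Char) : Nat → Int → Option Int
  | 0, _ => none
  | f+1, c =>
    if c > 0 then
      if PySem.List.pyGetD cs (c-1) ' ' = '.' then some (c-1)
      else if PySem.List.pyGetD cs (c-1) ' ' = '#' then none
      else scanB n cs f (c-1)
    else
      if PySem.List.pyGetD cs ((n : Int)-1) ' ' = '.' then some ((n : Int)-1)
      else if PySem.List.pyGetD cs ((n : Int)-1) ' ' = '#' then none
      else scanB n cs f ((n : Int)-1)

-- table semantics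
def tabF (cs : List Char) (c : Nat) : Int :=
  if h : c + 1 < cs.length then
    (if pvTile cs[c+1] then ((c : Int)+1) else tabF cs (c+1))
  else pvFirstF cs
termination_by cs.length - c

def tabB (cs : List Char) : Nat → Int
  | 0 => pvLastB cs
  | c+1 => if pvTile (cs.getD c ' ') then (c : Int) else tabB cs c

def mwalk (cs : List Char) (sg : Nat → Nat) : Nat → Nat → Nat
  | 0, c => c
  | k+1, c => if cs.getD (sg c) ' ' = '#' then c else mwalk cs sg k (sg c)

-- ---- facts about ftl / ftb ----
lemma ftl_some (cs : List Char) (k t : Nat) (h : ftl cs k = some t) :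
    k ≤ t ∧ t < cs.length ∧ pvTile (cs.getD t ' ') = true := by
  fun_induction ftl cs k with
  | case1 k hk htile =>
      simp only [Option.some.injEq] at h
      subst h
      exact ⟨le_refl _, hk, by simpa [List.getD_eq_getElem?_getD, hk] using htile⟩
  | case2 k hk htile ih =>
      rcases ih h with ⟨h1, h2, h3⟩; exact ⟨by omega, h2, h3⟩
  | case3 k hk => cases h

lemma ftl_none (cs : List Char) (k : Nat) (h : ftl cs k = none) :
    ∀ j, k ≤ j → j < cs.length → pvTile (cs.getD j ' ') = false := by
  fun_induction ftl cs k with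
  | case1 k hk htile => cases h
  | case2 k hk htile ih =>
      intro j hj hjl
      rcases Nat.eq_or_lt_of_le hj with rfl | hlt
      · simpa [List.getD_eq_getElem?_getD, hk] using htile
      · exact ih h j hlt hjl
  | case3 k hk => intro j hj hjl; omega

lemma ftl_isSome (cs : List Char) (h : cs.any pvTile = true) : (ftl cs 0).isSome := by
  rcases List.any_eq_true.mp h with ⟨ch, hmem, htile⟩
  rcases List.mem_iff_getElem.mp hmem with ⟨j, hj, rfl⟩
  cases heq : ftl cs 0 with
  | some t => simp
  | none =>
      have := ftl_none cs 0 heq j (Nat.zero_le _) hj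
      simp [List.getD_eq_getElem?_getD, hj] at this
      simp_all

lemma ftb_some (cs : List Char) (k t : Nat) (h : ftb cs k = some t) :
    t < k ∧ t < cs.length ∧ pvTile (cs.getD t ' ') = true := by
  induction k with
  | zero => cases h
  | succ k ih =>
      by_cases hk : k < cs.length
      · rw [ftb, dif_pos hk] at h
        by_cases htile : pvTile cs[k]
        · rw [if_pos htile] at h
          simp only [Option.some.injEq] at h
          subst h
          exact ⟨Nat.lt_succ_self _, hk, by simpa [List.getD_eq_getElem?_getD, hk] using htile⟩
        · rw [if_neg htile] at h
          rcases ih h with ⟨h1, h2, h3⟩; exact ⟨by omega, h2, h3⟩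
      · rw [ftb, dif_neg hk] at h
        rcases ih h with ⟨h1, h2, h3⟩; exact ⟨by omega, h2, h3⟩

lemma ftb_none (cs : List Char) (k : Nat) (h : ftb cs k = none) :
    ∀ j, j < k → j < cs.length → pvTile (cs.getD j ' ') = false := by
  induction k with
  | zero => intro j hj _; omega
  | succ k ih =>
      intro j hj hjl
      by_cases hk : k < cs.length
      · rw [ftb, dif_pos hk] at h
        by_cases htile : pvTile cs[k]
        · rw [if_pos htile] at h; cases h
        · rw [if_neg htile] at h
          rcases Nat.lt_succ_iff_lt_or_eq.mp hj with hlt | rfl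
          · exact ih h j hlt hjl
          · simpa [List.getD_eq_getElem?_getD, hk] using htile
      · rw [ftb, dif_neg hk] at h
        rcases Nat.lt_succ_iff_lt_or_eq.mp hj with hlt | rfl
        · exact ih h j hlt hjl
        · omega

lemma ftb_isSome (cs : List Char) (h : cs.any pvTile = true) : (ftb cs cs.length).isSome := by
  rcases List.any_eq_true.mp h with ⟨ch, hmem, htile⟩
  rcases List.mem_iff_getElem.mp hmem with ⟨j, hj, rfl⟩
  cases heq : ftb cs cs.length with
  | some t => simp
  | none =>
      have := ftb_none cs cs.length heq j hj hj
      simp [List.getD_eq_getElem?_getD, hj] at this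
      simp_all

-- ---- the initial values of the tables ----
lemma find?_range'_ftl (cs : List Char) : ∀ k,
    (List.range' k (cs.length - k)).find? (fun i => pvTile (cs.getD i ' ')) = ftl cs k := by
  intro k
  fun_induction ftl cs k with
  | case1 k hk htile =>
      have hn : cs.length - k = (cs.length - (k+1)) + 1 := by omega
      rw [hn, List.range'_succ]
      rw [List.find?_cons_of_pos]
      simpa [List.getD_eq_getElem?_getD, hk] using htile
  | case2 k hk htile ih =>
      have hn : cs.length - k = (cs.length - (k+1)) + 1 := by omega
      rw [hn, List.range'_succ]
      rw [List.find?_cons_of_neg]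
      · exact ih
      · simpa [List.getD_eq_getElem?_getD, hk] using htile
  | case3 k hk =>
      have hn : cs.length - k = 0 := by omega
      rw [hn]
      simp

lemma pvFirstF_spec (cs : List Char) :
    pvFirstF cs = (((ftl cs 0).getD 0 : Nat) : Int) := by
  have h := find?_range'_ftl cs 0
  rw [Nat.sub_zero, ← List.range_eq_range'] at h
  rw [pvFirstF, h]
  cases ftl cs 0 <;> simp

lemma find?_revrange_ftb (cs : List Char) : ∀ j,
    ((List.range j).reverse.find? (fun i => pvTile (cs.getD i ' '))) = ftb cs j := by
  intro j
  induction j with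
  | zero => simp [ftb]
  | succ j ih =>
      rw [List.range_succ, List.reverse_append]
      simp only [List.reverse_cons, List.reverse_nil, List.nil_append, List.singleton_append]
      by_cases hp : pvTile (cs.getD j ' ') = true
      · have hj : j < cs.length := by
          by_contra hno
          rw [List.getD_eq_default _ _ (by omega)] at hp
          simp [pvTile] at hp
        rw [List.find?_cons_of_pos (by simpa using hp), ftb, dif_pos hj,
            if_pos (by simpa [List.getD_eq_getElem?_getD, hj] using hp)]
      · rw [List.find?_cons_of_neg (by simpa using hp), ih]
        by_cases hj : j < cs.length
        · rw [ftb, dif_pos hj, if_neg (by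
            intro hc
            exact hp (by simpa [List.getD_eq_getElem?_getD, hj] using hc))]
        · rw [ftb, dif_neg hj]

lemma pvLastB_spec (cs : List Char) :
    pvLastB cs = (((ftb cs cs.length).getD 0 : Nat) : Int) := by
  have h := find?_revrange_ftb cs cs.length
  rw [pvLastB, h]
  cases ftb cs cs.length <;> simp

-- ---- the tables compute tabF / tabB ----
lemma buildF_inv (cs : List Char) : ∀ k, k < cs.length →
    buildF cs k ((List.range' k (cs.length - k)).map (tabF cs)) =
      (List.range cs.length).map (tabF cs) := by
  intro k
  induction k with
  | zero => intro _; rw [buildF, Nat.sub_zero, ← List.range_eq_range']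
  | succ k ih =>
      intro hk
      rw [buildF]
      have hlen : cs.length - (k+1) = (cs.length - (k+2)) + 1 := by omega
      have hacc : (List.range' (k+1) (cs.length - (k+1))).map (tabF cs) =
          tabF cs (k+1) :: (List.range' (k+2) (cs.length - (k+2))).map (tabF cs) := by
        rw [hlen, List.range'_succ, List.map_cons]
      have hv : (if pvTile (cs.getD (k+1) ' ') then ((k : Int)+1) else
          (((List.range' (k+1) (cs.length - (k+1))).map (tabF cs)).headD 0)) = tabF cs k := by
        rw [tabF, dif_pos hk, hacc]
        simp only [List.headD_cons]
        rw [List.getD_eq_getElem?_getD]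
        simp [hk]
      rw [hv]
      have hcons : tabF cs k :: (List.range' (k+1) (cs.length - (k+1))).map (tabF cs) =
          (List.range' k (cs.length - k)).map (tabF cs) := by
        have : cs.length - k = (cs.length - (k+1)) + 1 := by omega
        rw [this, List.range'_succ, List.map_cons]
      rw [hcons]
      exact ih (by omega)

lemma pvNxtF_eq (cs : List Char) (h : cs ≠ []) :
    pvNxtF cs = (List.range cs.length).map (tabF cs) := by
  have hn : 0 < cs.length := List.length_pos_iff.mpr h
  have h1 : [pvFirstF cs] = (List.range' (cs.length - 1) (cs.length - (cs.length - 1))).map (tabF cs) := by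
    have : cs.length - (cs.length - 1) = 1 := by omega
    rw [this, List.range'_one, List.map_cons, List.map_nil]
    congr 1
    rw [tabF, dif_neg (by omega)]
  rw [pvNxtF, h1]
  exact buildF_inv cs (cs.length - 1) (by omega)

lemma buildB_inv (cs : List Char) : ∀ k c, 1 ≤ c → c + k = cs.length →
    buildB cs c k (((List.range c).map (tabB cs)).reverse) =
      (List.range cs.length).map (tabB cs) := by
  intro k
  induction k with
  | zero => intro c _ hc; rw [buildB, List.reverse_reverse]; rw [← hc]; simp
  | succ k ih =>
      intro c hc1 hck
      rw [buildB]
      have hsplit : (List.range c).map (tabB cs) =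
          ((List.range (c-1)).map (tabB cs)) ++ [tabB cs (c-1)] := by
        have : c = (c-1) + 1 := by omega
        rw [this, List.range_succ, List.map_append, List.map_cons, List.map_nil]
        simp
      have hrev : (((List.range c).map (tabB cs))).reverse =
          tabB cs (c-1) :: ((List.range (c-1)).map (tabB cs)).reverse := by
        rw [hsplit, List.reverse_append]; simp
      have hv : (if pvTile (cs.getD (c-1) ' ') then ((c : Int)-1) else
          ((((List.range c).map (tabB cs))).reverse.headD 0)) = tabB cs c := by
        rw [hrev]
        simp only [List.headD_cons]
        have hcc : c = (c-1) + 1 := by omega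
        conv_rhs => rw [hcc]
        rw [tabB]
        by_cases ht : pvTile (cs.getD (c-1) ' ')
        · rw [if_pos ht, if_pos ht]; omega
        · rw [if_neg ht, if_neg ht]
      rw [hv]
      have hcons : tabB cs c :: (((List.range c).map (tabB cs))).reverse =
          (((List.range (c+1)).map (tabB cs))).reverse := by
        rw [List.range_succ, List.map_append, List.reverse_append]; simp
      rw [hcons]
      exact ih (c+1) (by omega) (by omega)

lemma pvNxtB_eq (cs : List Char) (h : cs ≠ []) :
    pvNxtB cs = (List.range cs.length).map (tabB cs) := by
  have hn : 0 < cs.length := List.length_pos_iff.mpr h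
  have h1 : [pvLastB cs] = (((List.range 1).map (tabB cs))).reverse := by
    simp [List.range_one, tabB]
  rw [pvNxtB, h1]
  exact buildB_inv cs (cs.length - 1) 1 (by omega) (by omega)

-- ---- tabF / tabB compute specFa / specBa ----
lemma tabF_eq (cs : List Char) (c : Nat) :
    tabF cs c = ((specFa cs c : Nat) : Int) := by
  fun_induction tabF cs c with
  | case1 c hk htile =>
      have hftl : ftl cs (c+1) = some (c+1) := by
        rw [ftl, dif_pos hk, if_pos htile]
      simp [specFa, hftl]
  | case2 c hk htile ih =>
      have hftl : ftl cs (c+1) = ftl cs (c+2) := by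
        rw [ftl, dif_pos hk, if_neg htile]
      rw [ih]
      simp only [specFa, hftl]
  | case3 c hk =>
      have hftl : ftl cs (c+1) = none := by rw [ftl, dif_neg hk]
      simp only [specFa, hftl]
      exact pvFirstF_spec cs

lemma tabB_eq (cs : List Char) (c : Nat) :
    tabB cs c = ((specBa cs c : Nat) : Int) := by
  induction c with
  | zero =>
      have h0 : ftb cs 0 = none := rfl
      simp only [tabB, specBa, h0]
      exact pvLastB_spec cs
  | succ c ih =>
      by_cases hk : c < cs.length
      · by_cases ht : pvTile (cs.getD c ' ')
        · have hftb : ftb cs (c+1) = some c := by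
            rw [ftb, dif_pos hk, if_pos (by simpa [List.getD_eq_getElem?_getD, hk] using ht)]
          simp only [tabB]
          rw [if_pos ht]
          simp [specBa, hftb]
        · have hftb : ftb cs (c+1) = ftb cs c := by
            rw [ftb, dif_pos hk, if_neg (by
              intro hcon
              exact ht (by simpa [List.getD_eq_getElem?_getD, hk] using hcon))]
          rw [tabB, if_neg ht, ih]
          simp only [specBa, hftb]
      · have ht : pvTile (cs.getD c ' ') = false := by
          rw [List.getD_eq_default _ _ (by omega)]
          decide
        have hftb : ftb cs (c+1) = ftb cs c := by rw [ftb, dif_neg hk]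
        have ht2 : pvTile (cs[c]?.getD ' ') = false := by
          rw [List.getElem?_eq_none (by omega)]; decide
        rw [tabB, if_neg (by simp [ht2]), ih]
        simp only [specBa, hftb]

lemma specFa_lt (cs : List Char) (h : cs.any pvTile = true) (c : Nat) : specFa cs c < cs.length := by
  rw [specFa]
  cases h1 : ftl cs (c+1) with
  | some t => exact (ftl_some cs _ t h1).2.1
  | none =>
      obtain ⟨t, ht⟩ := Option.isSome_iff_exists.mp (ftl_isSome cs h)
      rw [ht]
      exact (ftl_some cs 0 t ht).2.1

lemma specBa_lt (cs : List Char) (h : cs.any pvTile = true) (c : Nat) : specBa cs c < cs.length := by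
  rw [specBa]
  cases h1 : ftb cs c with
  | some t => exact (ftb_some cs _ t h1).2.1
  | none =>
      obtain ⟨t, ht⟩ := Option.isSome_iff_exists.mp (ftb_isSome cs h)
      rw [ht]
      exact (ftb_some cs _ t ht).2.1

-- ---- scanners compute specFa / specBa ----
lemma tile_cases (ch : Char) (h : pvTile ch = true) : ch = '.' ∨ ch = '#' := by
  simp [pvTile] at h; tauto

lemma tile_not (ch : Char) (h : pvTile ch = false) : ¬ ch = '.' ∧ ¬ ch = '#' := by
  simp [pvTile] at h; tauto

lemma scanF_found (cs : List Char) : ∀ f (c t : Nat), c < cs.length → ftl cs (c+1) = some t →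
    cs.length - c ≤ f →
    scanF cs.length cs f (c : Int) = (if cs.getD t ' ' = '#' then none else some ((t : Nat) : Int)) := by
  intro f
  induction f with
  | zero => intro c t hc _ hfuel; omega
  | succ f ih =>
      intro c t hc hftl hfuel
      obtain ⟨hct, htlt, htile⟩ := ftl_some _ _ _ hftl
      have hb : (c : Int) < (cs.length : Int) - 1 := by omega
      have hcast : ((c : Int) + 1) = (((c+1 : Nat)) : Int) := by push_cast; ring
      rw [scanF, if_pos hb, hcast, PySem.List.pyGetD_natCast]
      have hlt1 : c + 1 < cs.length := by omega
      rw [ftl, dif_pos hlt1] at hftl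
      by_cases ht1 : pvTile cs[c+1]
      · rw [if_pos ht1] at hftl
        simp only [Option.some.injEq] at hftl
        subst hftl
        have hgd : cs.getD (c+1) ' ' = cs[c+1] := by simp [List.getD_eq_getElem?_getD, hlt1]
        rcases tile_cases _ (by rwa [← hgd] at ht1) with hdot | hhash
        · rw [hgd] at hdot ⊢
          rw [hdot]
          simp
        · rw [hgd] at hhash ⊢
          rw [hhash]
          simp
      · rw [if_neg ht1] at hftl
        have hgd : cs.getD (c+1) ' ' = cs[c+1] := by simp [List.getD_eq_getElem?_getD, hlt1]
        obtain ⟨hnd, hnh⟩ := tile_not (cs.getD (c+1) ' ') (by rw [hgd]; simpa using ht1)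
        rw [if_neg hnd, if_neg hnh]
        exact ih (c+1) t hlt1 hftl (by omega)

lemma scanF_wrap (cs : List Char) : ∀ f (c t0 : Nat), c < cs.length → ftl cs (c+1) = none →
    ftl cs 0 = some t0 → (cs.length - c) + cs.length ≤ f →
    scanF cs.length cs f (c : Int) = (if cs.getD t0 ' ' = '#' then none else some ((t0 : Nat) : Int)) := by
  intro f
  induction f with
  | zero => intro c t0 hc _ _ hfuel; omega
  | succ f ih =>
      intro c t0 hc hftl h0 hfuel
      by_cases hb : c + 1 < cs.length
      · have hbi : (c : Int) < (cs.length : Int) - 1 := by omega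
        have hcast : ((c : Int) + 1) = (((c+1 : Nat)) : Int) := by push_cast; ring
        rw [scanF, if_pos hbi, hcast, PySem.List.pyGetD_natCast]
        rw [ftl, dif_pos hb] at hftl
        by_cases ht1 : pvTile cs[c+1]
        · rw [if_pos ht1] at hftl; cases hftl
        · rw [if_neg ht1] at hftl
          have hgd : cs.getD (c+1) ' ' = cs[c+1] := by simp [List.getD_eq_getElem?_getD, hb]
          obtain ⟨hnd, hnh⟩ := tile_not (cs.getD (c+1) ' ') (by rw [hgd]; simpa using ht1)
          rw [if_neg hnd, if_neg hnh]
          exact ih (c+1) t0 hb hftl h0 (by omega)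
      · have hbi : ¬ ((c : Int) < (cs.length : Int) - 1) := by omega
        rw [scanF, if_neg hbi, PySem.List.pyGetD_zero]
        have h0lt : 0 < cs.length := by omega
        rw [ftl, dif_pos h0lt] at h0
        have hgd : cs.getD 0 ' ' = cs[0] := by simp [List.getD_eq_getElem?_getD, h0lt]
        by_cases ht0 : pvTile cs[0]
        · rw [if_pos ht0] at h0
          simp only [Option.some.injEq] at h0
          subst h0
          rcases tile_cases _ (by rwa [← hgd] at ht0) with hdot | hhash
          · rw [hgd] at hdot ⊢
            rw [hdot]
            simp
          · rw [hgd] at hhash ⊢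
            rw [hhash]
            simp
        · rw [if_neg ht0] at h0
          obtain ⟨hnd, hnh⟩ := tile_not (cs.getD 0 ' ') (by rw [hgd]; simpa using ht0)
          rw [if_neg hnd, if_neg hnh]
          have := scanF_found cs f 0 t0 h0lt (by simpa using h0) (by omega)
          simpa using this

lemma scanF_spec (cs : List Char) (h : cs.any pvTile = true) (f c : Nat)
    (hc : c < cs.length) (hf : 2 * cs.length + 1 ≤ f) :
    scanF cs.length cs f c =
      (if cs.getD (specFa cs c) ' ' = '#' then none else some ((specFa cs c : Nat) : Int)) := by
  cases hftl : ftl cs (c+1) with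
  | some t =>
      have hs : specFa cs c = t := by simp [specFa, hftl]
      rw [hs]
      exact scanF_found cs f c t hc hftl (by omega)
  | none =>
      obtain ⟨t0, ht0⟩ := Option.isSome_iff_exists.mp (ftl_isSome cs h)
      have hs : specFa cs c = t0 := by simp [specFa, hftl, ht0]
      rw [hs]
      exact scanF_wrap cs f c t0 hc hftl ht0 (by omega)

lemma scanB_found (cs : List Char) : ∀ f (c t : Nat), c < cs.length → ftb cs c = some t →
    c + 1 ≤ f →
    scanB cs.length cs f (c : Int) = (if cs.getD t ' ' = '#' then none else some ((t : Nat) : Int)) := by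
  intro f
  induction f with
  | zero => intro c t hc _ hfuel; omega
  | succ f ih =>
      intro c t hc hftb hfuel
      obtain ⟨hct, htlt, htile⟩ := ftb_some _ _ _ hftb
      have hc1 : 1 ≤ c := by omega
      have hb : (0 : Int) < (c : Int) := by omega
      have hcast : ((c : Int) - 1) = (((c-1 : Nat)) : Int) := by omega
      rw [scanB, if_pos hb, hcast, PySem.List.pyGetD_natCast]
      have hlt1 : c - 1 < cs.length := by omega
      have hftb' : ftb cs ((c-1)+1) = some t := by rw [show (c-1)+1 = c by omega]; exact hftb
      rw [ftb, dif_pos hlt1] at hftb'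
      have hgd : cs.getD (c-1) ' ' = cs[c-1] := by simp [List.getD_eq_getElem?_getD, hlt1]
      by_cases ht1 : pvTile cs[c-1]
      · rw [if_pos ht1] at hftb'
        simp only [Option.some.injEq] at hftb'
        subst hftb'
        rcases tile_cases _ (by rwa [← hgd] at ht1) with hdot | hhash
        · rw [hgd] at hdot ⊢
          rw [hdot]
          simp
        · rw [hgd] at hhash ⊢
          rw [hhash]
          simp
      · rw [if_neg ht1] at hftb'
        obtain ⟨hnd, hnh⟩ := tile_not (cs.getD (c-1) ' ') (by rw [hgd]; simpa using ht1)
        rw [if_neg hnd, if_neg hnh]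
        exact ih (c-1) t hlt1 hftb' (by omega)

lemma scanB_wrap (cs : List Char) : ∀ f (c t0 : Nat), c < cs.length → ftb cs c = none →
    ftb cs cs.length = some t0 → c + 1 + cs.length ≤ f →
    scanB cs.length cs f (c : Int) = (if cs.getD t0 ' ' = '#' then none else some ((t0 : Nat) : Int)) := by
  intro f
  induction f with
  | zero => intro c t0 hc _ _ hfuel; omega
  | succ f ih =>
      intro c t0 hc hftb h0 hfuel
      by_cases hc0 : c = 0
      · subst hc0
        have hb : ¬ ((0 : Int) > (0 : Nat)) := by omega
        have hlen : 0 < cs.length := by omega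
        have hcast : ((cs.length : Int) - 1) = (((cs.length - 1 : Nat)) : Int) := by omega
        rw [scanB]
        rw [if_neg (show ¬ (((0:Nat):Int) > (0:Int)) by omega), hcast, PySem.List.pyGetD_natCast]
        have hlt1 : cs.length - 1 < cs.length := by omega
        have h0' : ftb cs ((cs.length - 1)+1) = some t0 := by
          rw [show (cs.length - 1)+1 = cs.length by omega]; exact h0
        rw [ftb, dif_pos hlt1] at h0'
        have hgd : cs.getD (cs.length - 1) ' ' = cs[cs.length - 1] := by
          simp [List.getD_eq_getElem?_getD, hlt1]
        by_cases ht1 : pvTile cs[cs.length - 1]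
        · rw [if_pos ht1] at h0'
          simp only [Option.some.injEq] at h0'
          subst h0'
          rcases tile_cases _ (by rwa [← hgd] at ht1) with hdot | hhash
          · rw [hgd] at hdot ⊢
            rw [hdot]
            simp
          · rw [hgd] at hhash ⊢
            rw [hhash]
            simp
        · rw [if_neg ht1] at h0'
          obtain ⟨hnd, hnh⟩ := tile_not (cs.getD (cs.length - 1) ' ') (by rw [hgd]; simpa using ht1)
          rw [if_neg hnd, if_neg hnh]
          exact scanB_found cs f (cs.length - 1) t0 hlt1 h0' (by omega)
      · have hc1 : 1 ≤ c := by omega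
        have hb : ((c : Int)) > 0 := by omega
        have hcast : ((c : Int) - 1) = (((c-1 : Nat)) : Int) := by omega
        rw [scanB, if_pos hb, hcast, PySem.List.pyGetD_natCast]
        have hlt1 : c - 1 < cs.length := by omega
        have hftb' : ftb cs ((c-1)+1) = none := by rw [show (c-1)+1 = c by omega]; exact hftb
        rw [ftb, dif_pos hlt1] at hftb'
        have hgd : cs.getD (c-1) ' ' = cs[c-1] := by simp [List.getD_eq_getElem?_getD, hlt1]
        by_cases ht1 : pvTile cs[c-1]
        · rw [if_pos ht1] at hftb'; cases hftb'
        · rw [if_neg ht1] at hftb'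
          obtain ⟨hnd, hnh⟩ := tile_not (cs.getD (c-1) ' ') (by rw [hgd]; simpa using ht1)
          rw [if_neg hnd, if_neg hnh]
          exact ih (c-1) t0 hlt1 hftb' h0 (by omega)

lemma scanB_spec (cs : List Char) (h : cs.any pvTile = true) (f c : Nat)
    (hc : c < cs.length) (hf : 2 * cs.length + 1 ≤ f) :
    scanB cs.length cs f c =
      (if cs.getD (specBa cs c) ' ' = '#' then none else some ((specBa cs c : Nat) : Int)) := by
  cases hftb : ftb cs c with
  | some t =>
      have hs : specBa cs c = t := by simp [specBa, hftb]
      rw [hs]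
      exact scanB_found cs f c t hc hftb (by omega)
  | none =>
      obtain ⟨t0, ht0⟩ := Option.isSome_iff_exists.mp (ftb_isSome cs h)
      have hs : specBa cs c = t0 := by simp [specBa, hftb, ht0]
      rw [hs]
      exact scanB_wrap cs f c t0 hc hftb ht0 (by omega)

-- ---- A's helpers are the generic scanners ----
lemma pvCh_row (m : List String) (r : Int) (s : String)
    (hs : PySem.List.pyGet? m r = some s) (i : Int) :
    pvCh m r i = PySem.List.pyGetD s.toList i ' ' := by
  simp [pvCh, hs, PySem.Str.pyGet?, PySem.List.pyGetD]

lemma pvRowLen_row (m : List String) (r : Int) (s : String)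
    (hs : PySem.List.pyGet? m r = some s) :
    pvRowLen m r = (s.toList.length : Int) := by
  simp [pvRowLen, hs]

lemma pvCh_col (m : List String) (c i : Int) :
    pvCh m i c = PySem.List.pyGetD (pvColumn m c) i ' ' := by
  have hmap : PySem.List.pyGet? (pvColumn m c) i =
      (PySem.List.pyGet? m i).map (fun s => (PySem.Str.pyGet? s c).getD ' ') := by
    simp [pvColumn, PySem.List.pyGet?, PySem.List.pyIdx?]
  rw [PySem.List.pyGetD, hmap]  -- unfolds pyGetD to pyGet? ∘ getD if defeq
  cases heq : PySem.List.pyGet? m i with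
  | some s => simp [pvCh, heq]
  | none => simp [pvCh, heq]

lemma pvColumn_len (m : List String) (c : Int) : (pvColumn m c).length = m.length := by
  simp [pvColumn]

lemma eastA_corr (m : List String) (r : Int) (s : String)
    (hs : PySem.List.pyGet? m r = some s) :
    ∀ f (r0 c0 c : Int), updEastA f m r0 c0 r c =
      (match scanF s.toList.length s.toList f c with
       | some t => (r, t)
       | none => (r0, c0)) := by
  intro f
  induction f with
  | zero => intro r0 c0 c; simp [updEastA, scanF]
  | succ f ih =>
      intro r0 c0 c
      simp only [updEastA, scanF, pvCh_row m r s hs, pvRowLen_row m r s hs]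
      by_cases h1 : c < (s.toList.length : Int) - 1
      · rw [if_pos h1, if_pos h1]
        by_cases h2 : PySem.List.pyGetD s.toList (c+1) ' ' = '.'
        · rw [if_pos h2, if_pos h2]
        · rw [if_neg h2, if_neg h2]
          by_cases h3 : PySem.List.pyGetD s.toList (c+1) ' ' = '#'
          · rw [if_pos h3, if_pos h3]
          · rw [if_neg h3, if_neg h3]
            exact ih r0 c0 (c+1)
      · rw [if_neg h1, if_neg h1]
        by_cases h2 : PySem.List.pyGetD s.toList 0 ' ' = '.'
        · rw [if_pos h2, if_pos h2]
        · rw [if_neg h2, if_neg h2]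
          by_cases h3 : PySem.List.pyGetD s.toList 0 ' ' = '#'
          · rw [if_pos h3, if_pos h3]
          · rw [if_neg h3, if_neg h3]
            exact ih r0 c0 0

lemma westA_corr (m : List String) (r : Int) (s : String)
    (hs : PySem.List.pyGet? m r = some s) :
    ∀ f (r0 c0 c : Int), updWestA f m r0 c0 r c =
      (match scanB s.toList.length s.toList f c with
       | some t => (r, t)
       | none => (r0, c0)) := by
  intro f
  induction f with
  | zero => intro r0 c0 c; simp [updWestA, scanB]
  | succ f ih =>
      intro r0 c0 c
      simp only [updWestA, scanB, pvCh_row m r s hs, pvRowLen_row m r s hs]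
      by_cases h1 : c > 0
      · rw [if_pos h1, if_pos h1]
        by_cases h2 : PySem.List.pyGetD s.toList (c-1) ' ' = '.'
        · rw [if_pos h2, if_pos h2]
        · rw [if_neg h2, if_neg h2]
          by_cases h3 : PySem.List.pyGetD s.toList (c-1) ' ' = '#'
          · rw [if_pos h3, if_pos h3]
          · rw [if_neg h3, if_neg h3]
            exact ih r0 c0 (c-1)
      · rw [if_neg h1, if_neg h1]
        by_cases h2 : PySem.List.pyGetD s.toList ((s.toList.length : Int)-1) ' ' = '.'
        · rw [if_pos h2, if_pos h2]
        · rw [if_neg h2, if_neg h2]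
          by_cases h3 : PySem.List.pyGetD s.toList ((s.toList.length : Int)-1) ' ' = '#'
          · rw [if_pos h3, if_pos h3]
          · rw [if_neg h3, if_neg h3]
            exact ih r0 c0 ((s.toList.length : Int)-1)

lemma southA_corr (m : List String) (c : Int) :
    ∀ f (r0 c0 r : Int), updSouthA f m r0 c0 r c =
      (match scanF m.length (pvColumn m c) f r with
       | some t => (t, c)
       | none => (r0, c0)) := by
  intro f
  induction f with
  | zero => intro r0 c0 r; simp [updSouthA, scanF]
  | succ f ih =>
      intro r0 c0 r
      simp only [updSouthA, scanF, pvCh_col m c]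
      by_cases h1 : r < (m.length : Int) - 1
      · rw [if_pos h1, if_pos h1]
        by_cases h2 : PySem.List.pyGetD (pvColumn m c) (r+1) ' ' = '.'
        · rw [if_pos h2, if_pos h2]
        · rw [if_neg h2, if_neg h2]
          by_cases h3 : PySem.List.pyGetD (pvColumn m c) (r+1) ' ' = '#'
          · rw [if_pos h3, if_pos h3]
          · rw [if_neg h3, if_neg h3]
            exact ih r0 c0 (r+1)
      · rw [if_neg h1, if_neg h1]
        by_cases h2 : PySem.List.pyGetD (pvColumn m c) 0 ' ' = '.'
        · rw [if_pos h2, if_pos h2]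
        · rw [if_neg h2, if_neg h2]
          by_cases h3 : PySem.List.pyGetD (pvColumn m c) 0 ' ' = '#'
          · rw [if_pos h3, if_pos h3]
          · rw [if_neg h3, if_neg h3]
            exact ih r0 c0 0

lemma northA_corr (m : List String) (c : Int) :
    ∀ f (r0 c0 r : Int), updNorthA f m r0 c0 r c =
      (match scanB m.length (pvColumn m c) f r with
       | some t => (t, c)
       | none => (r0, c0)) := by
  intro f
  induction f with
  | zero => intro r0 c0 r; simp [updNorthA, scanB]
  | succ f ih =>
      intro r0 c0 r
      simp only [updNorthA, scanB, pvCh_col m c]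
      by_cases h1 : r > 0
      · rw [if_pos h1, if_pos h1]
        by_cases h2 : PySem.List.pyGetD (pvColumn m c) (r-1) ' ' = '.'
        · rw [if_pos h2, if_pos h2]
        · rw [if_neg h2, if_neg h2]
          by_cases h3 : PySem.List.pyGetD (pvColumn m c) (r-1) ' ' = '#'
          · rw [if_pos h3, if_pos h3]
          · rw [if_neg h3, if_neg h3]
            exact ih r0 c0 (r-1)
      · rw [if_neg h1, if_neg h1]
        by_cases h2 : PySem.List.pyGetD (pvColumn m c) ((m.length : Int)-1) ' ' = '.'
        · rw [if_pos h2, if_pos h2]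
        · rw [if_neg h2, if_neg h2]
          by_cases h3 : PySem.List.pyGetD (pvColumn m c) ((m.length : Int)-1) ' ' = '#'
          · rw [if_pos h3, if_pos h3]
          · rw [if_neg h3, if_neg h3]
            exact ih r0 c0 ((m.length : Int)-1)

-- ---- B's walk equals the mathematical walk ----
lemma walk_eq_mwalk (cs : List Char) (nxt : List Int) (sg : Nat → Nat)
    (Hlt : ∀ c, c < cs.length → sg c < cs.length)
    (Htab : ∀ c : Nat, c < cs.length → PySem.List.pyGetD nxt (c : Int) 0 = ((sg c : Nat) : Int)) :
    ∀ k (c : Nat), c < cs.length → pvWalk cs nxt k (c : Int) = ((mwalk cs sg k c : Nat) : Int) := by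
  intro k
  induction k with
  | zero => intro c _; simp [pvWalk, mwalk]
  | succ k ih =>
      intro c hc
      simp only [pvWalk, mwalk, Htab c hc, PySem.List.pyGetD_natCast]
      by_cases hwall : cs.getD (sg c) ' ' = '#'
      · rw [if_pos hwall, if_pos hwall]
      · rw [if_neg hwall, if_neg hwall]
        exact ih (sg c) (Hlt c hc)

-- ---- pyRange facts ----
lemma pyRange_len_pos (d : Int) (h : 0 < d) : (PySem.List.pyRange 0 d 1).length = d.toNat := by
  simp [PySem.List.pyRange]
  omega

lemma pyRange_nil (d : Int) (h : d ≤ 0) : PySem.List.pyRange 0 d 1 = [] := by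
  simp [PySem.List.pyRange]
  omega

-- ---- A's loop equals the mathematical walk (one lemma per facing) ----
lemma mwalk_wall (cs : List Char) (sg : Nat → Nat) (c : Nat)
    (hwall : cs.getD (sg c) ' ' = '#') : ∀ k, mwalk cs sg k c = c := by
  intro k
  cases k with
  | zero => rfl
  | succ k => simp only [mwalk]; rw [if_pos hwall]

lemma fuel_row (m : List String) (r : Int) (s : String)
    (hs : PySem.List.pyGet? m r = some s) : 2 * s.toList.length + 1 ≤ pvFuel m := by
  have hmem : s ∈ m := PySem.List.mem_of_pyGet?_eq_some m hs
  have hsum : ∀ (g : String → Nat) (l : List String) (a : Nat),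
      l.foldl (fun a s => a + g s) a = a + (l.map g).sum := by
    intro g l
    induction l with
    | nil => intro a; simp
    | cons x xs ih => intro a; simp [List.foldl_cons, ih, Nat.add_assoc]
  have hle : s.toList.length ≤ (m.map (fun s => s.toList.length)).sum :=
    List.single_le_sum (by intro x _; omega) _ (List.mem_map_of_mem hmem)
  have := hsum (fun s => s.toList.length) m 0
  rw [pvFuel, this]
  omega

lemma fuel_col (m : List String) : 2 * m.length + 1 ≤ pvFuel m := by
  rw [pvFuel]
  omega

lemma foldE (m : List String) (r : Int) (s : String) (hs : PySem.List.pyGet? m r = some s)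
    (h : s.toList.any pvTile = true) :
    ∀ (l : List Int) (c : Nat), c < s.toList.length →
      l.foldl (fun rc (_ : Int) => updEastA (pvFuel m) m rc.1 rc.2 rc.1 rc.2) (r, (c : Int)) =
        (r, ((mwalk s.toList (specFa s.toList) l.length c : Nat) : Int)) := by
  intro l
  induction l with
  | nil => intro c hc; simp [mwalk]
  | cons a tl ih =>
      intro c hc
      rw [List.foldl_cons]
      show List.foldl (fun rc (_ : Int) => updEastA (pvFuel m) m rc.1 rc.2 rc.1 rc.2)
          (updEastA (pvFuel m) m r (c : Int) r (c : Int)) tl = (r, ((mwalk s.toList (specFa s.toList) (a :: tl).length c : Nat) : Int))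
      rw [eastA_corr m r s hs (pvFuel m) r (c : Int) (c : Int),
          scanF_spec s.toList h (pvFuel m) c hc (fuel_row m r s hs)]
      by_cases hwall : s.toList.getD (specFa s.toList c) ' ' = '#'
      · rw [if_pos hwall]
        simp only [List.length_cons]
        rw [ih c hc, mwalk_wall s.toList (specFa s.toList) c hwall,
            mwalk_wall s.toList (specFa s.toList) c hwall]
      · rw [if_neg hwall]
        simp only [List.length_cons]
        have hmw : mwalk s.toList (specFa s.toList) (tl.length + 1) c =
            mwalk s.toList (specFa s.toList) tl.length (specFa s.toList c) := by
          simp only [mwalk]; rw [if_neg hwall]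
        rw [hmw]
        exact ih (specFa s.toList c) (specFa_lt s.toList h c)

lemma foldW (m : List String) (r : Int) (s : String) (hs : PySem.List.pyGet? m r = some s)
    (h : s.toList.any pvTile = true) :
    ∀ (l : List Int) (c : Nat), c < s.toList.length →
      l.foldl (fun rc (_ : Int) => updWestA (pvFuel m) m rc.1 rc.2 rc.1 rc.2) (r, (c : Int)) =
        (r, ((mwalk s.toList (specBa s.toList) l.length c : Nat) : Int)) := by
  intro l
  induction l with
  | nil => intro c hc; simp [mwalk]
  | cons a tl ih =>
      intro c hc
      rw [List.foldl_cons]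
      show List.foldl (fun rc (_ : Int) => updWestA (pvFuel m) m rc.1 rc.2 rc.1 rc.2)
          (updWestA (pvFuel m) m r (c : Int) r (c : Int)) tl = (r, ((mwalk s.toList (specBa s.toList) (a :: tl).length c : Nat) : Int))
      rw [westA_corr m r s hs (pvFuel m) r (c : Int) (c : Int),
          scanB_spec s.toList h (pvFuel m) c hc (fuel_row m r s hs)]
      by_cases hwall : s.toList.getD (specBa s.toList c) ' ' = '#'
      · rw [if_pos hwall]
        simp only [List.length_cons]
        rw [ih c hc, mwalk_wall s.toList (specBa s.toList) c hwall,
            mwalk_wall s.toList (specBa s.toList) c hwall]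
      · rw [if_neg hwall]
        simp only [List.length_cons]
        have hmw : mwalk s.toList (specBa s.toList) (tl.length + 1) c =
            mwalk s.toList (specBa s.toList) tl.length (specBa s.toList c) := by
          simp only [mwalk]; rw [if_neg hwall]
        rw [hmw]
        exact ih (specBa s.toList c) (specBa_lt s.toList h c)

lemma foldS (m : List String) (c : Int) (h : (pvColumn m c).any pvTile = true) :
    ∀ (l : List Int) (r : Nat), r < m.length →
      l.foldl (fun rc (_ : Int) => updSouthA (pvFuel m) m rc.1 rc.2 rc.1 rc.2) ((r : Int), c) =
        (((mwalk (pvColumn m c) (specFa (pvColumn m c)) l.length r : Nat) : Int), c) := by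
  intro l
  induction l with
  | nil => intro r hr; simp [mwalk]
  | cons a tl ih =>
      intro r hr
      have hr' : r < (pvColumn m c).length := by rw [pvColumn_len]; exact hr
      rw [List.foldl_cons]
      have hscan := scanF_spec (pvColumn m c) h (pvFuel m) r hr'
        (by rw [pvColumn_len]; exact fuel_col m)
      rw [pvColumn_len] at hscan
      show List.foldl (fun rc (_ : Int) => updSouthA (pvFuel m) m rc.1 rc.2 rc.1 rc.2)
          (updSouthA (pvFuel m) m (r : Int) c (r : Int) c) tl =
          (((mwalk (pvColumn m c) (specFa (pvColumn m c)) (a :: tl).length r : Nat) : Int), c)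
      rw [southA_corr m c (pvFuel m) (r : Int) c (r : Int), hscan]
      by_cases hwall : (pvColumn m c).getD (specFa (pvColumn m c) r) ' ' = '#'
      · rw [if_pos hwall]
        simp only [List.length_cons]
        rw [ih r hr, mwalk_wall (pvColumn m c) (specFa (pvColumn m c)) r hwall,
            mwalk_wall (pvColumn m c) (specFa (pvColumn m c)) r hwall]
      · rw [if_neg hwall]
        simp only [List.length_cons]
        have hmw : mwalk (pvColumn m c) (specFa (pvColumn m c)) (tl.length + 1) r =
            mwalk (pvColumn m c) (specFa (pvColumn m c)) tl.length (specFa (pvColumn m c) r) := by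
          simp only [mwalk]; rw [if_neg hwall]
        rw [hmw]
        exact ih (specFa (pvColumn m c) r) (by
          have := specFa_lt (pvColumn m c) h r
          rwa [pvColumn_len] at this)

lemma foldN (m : List String) (c : Int) (h : (pvColumn m c).any pvTile = true) :
    ∀ (l : List Int) (r : Nat), r < m.length →
      l.foldl (fun rc (_ : Int) => updNorthA (pvFuel m) m rc.1 rc.2 rc.1 rc.2) ((r : Int), c) =
        (((mwalk (pvColumn m c) (specBa (pvColumn m c)) l.length r : Nat) : Int), c) := by
  intro l
  induction l with
  | nil => intro r hr; simp [mwalk]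
  | cons a tl ih =>
      intro r hr
      have hr' : r < (pvColumn m c).length := by rw [pvColumn_len]; exact hr
      rw [List.foldl_cons]
      have hscan := scanB_spec (pvColumn m c) h (pvFuel m) r hr'
        (by rw [pvColumn_len]; exact fuel_col m)
      rw [pvColumn_len] at hscan
      show List.foldl (fun rc (_ : Int) => updNorthA (pvFuel m) m rc.1 rc.2 rc.1 rc.2)
          (updNorthA (pvFuel m) m (r : Int) c (r : Int) c) tl =
          (((mwalk (pvColumn m c) (specBa (pvColumn m c)) (a :: tl).length r : Nat) : Int), c)
      rw [northA_corr m c (pvFuel m) (r : Int) c (r : Int), hscan]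
      by_cases hwall : (pvColumn m c).getD (specBa (pvColumn m c) r) ' ' = '#'
      · rw [if_pos hwall]
        simp only [List.length_cons]
        rw [ih r hr, mwalk_wall (pvColumn m c) (specBa (pvColumn m c)) r hwall,
            mwalk_wall (pvColumn m c) (specBa (pvColumn m c)) r hwall]
      · rw [if_neg hwall]
        simp only [List.length_cons]
        have hmw : mwalk (pvColumn m c) (specBa (pvColumn m c)) (tl.length + 1) r =
            mwalk (pvColumn m c) (specBa (pvColumn m c)) tl.length (specBa (pvColumn m c) r) := by
          simp only [mwalk]; rw [if_neg hwall]
        rw [hmw]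
        exact ih (specBa (pvColumn m c) r) (by
          have := specBa_lt (pvColumn m c) h r
          rwa [pvColumn_len] at this)

lemma nxtF_tab (cs : List Char) (hne : cs ≠ []) (c : Nat) (hc : c < cs.length) :
    PySem.List.pyGetD (pvNxtF cs) (c : Int) 0 = ((specFa cs c : Nat) : Int) := by
  rw [pvNxtF_eq cs hne, PySem.List.pyGetD_natCast]
  rw [List.getD_eq_getElem?_getD]
  simp [hc, tabF_eq]

lemma nxtB_tab (cs : List Char) (hne : cs ≠ []) (c : Nat) (hc : c < cs.length) :
    PySem.List.pyGetD (pvNxtB cs) (c : Int) 0 = ((specBa cs c : Nat) : Int) := by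
  rw [pvNxtB_eq cs hne, PySem.List.pyGetD_natCast]
  rw [List.getD_eq_getElem?_getD]
  simp [hc, tabB_eq]

lemma foldl_id : ∀ (l : List Int) (p : Int × Int), l.foldl (fun rc (_ : Int) => rc) p = p := by
  intro l
  induction l with
  | nil => intro p; rfl
  | cons a tl ih => intro p; rw [List.foldl_cons]; exact ih p

theorem update_position_spec : Claim_equal_update_position := by
  unfold Claim_equal_update_position
  intro m facing row col dist _hdom hpre
  unfold Spec_update_position update_position update_position_alt
  by_cases hd : dist ≤ 0
  · rw [pyRange_nil dist hd, if_pos hd]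
    rfl
  · have hd' : 0 < dist := by omega
    obtain ⟨hEW, hNS⟩ := hpre hd'
    rw [if_neg hd]
    have hlen := pyRange_len_pos dist hd'
    by_cases h0 : facing = 0
    · subst h0
      obtain ⟨hr0, hrH, hc0, hcL, hany⟩ := hEW (Or.inl rfl)
      obtain ⟨s, hs⟩ : ∃ s, PySem.List.pyGet? m row = some s :=
        ⟨_, PySem.List.pyGet?_eq_some_getElem m hr0 hrH⟩
      have hcs : pvLine m row = s.toList := by simp [pvLine, hs]
      rw [hcs] at hcL hany
      have hcol : ((col.toNat : Nat) : Int) = col := Int.toNat_of_nonneg hc0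
      have hcln : col.toNat < s.toList.length := by omega
      have hfun : (fun (rc : Int × Int) (_ : Int) =>
          if (0 : Int) = 3 then updNorthA (pvFuel m) m rc.1 rc.2 rc.1 rc.2
          else if (0 : Int) = 0 then updEastA (pvFuel m) m rc.1 rc.2 rc.1 rc.2
          else if (0 : Int) = 1 then updSouthA (pvFuel m) m rc.1 rc.2 rc.1 rc.2
          else if (0 : Int) = 2 then updWestA (pvFuel m) m rc.1 rc.2 rc.1 rc.2
          else rc) = (fun rc _ => updEastA (pvFuel m) m rc.1 rc.2 rc.1 rc.2) := by
        funext rc i; norm_num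
      rw [if_pos (show (0 : Int) = 0 ∨ (0 : Int) = 2 by norm_num), if_pos rfl, hcs,
          ← hcol, hfun,
          foldE m row s hs hany (PySem.List.pyRange 0 dist 1) col.toNat hcln, hlen,
          walk_eq_mwalk s.toList (pvNxtF s.toList) (specFa s.toList)
            (fun c _ => specFa_lt _ hany c)
            (fun c hc => nxtF_tab _ (by intro hnil; rw [hnil] at hcln; simp at hcln) c hc)
            dist.toNat col.toNat hcln]
    · by_cases h2 : facing = 2
      · subst h2
        obtain ⟨hr0, hrH, hc0, hcL, hany⟩ := hEW (Or.inr rfl)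
        obtain ⟨s, hs⟩ : ∃ s, PySem.List.pyGet? m row = some s :=
          ⟨_, PySem.List.pyGet?_eq_some_getElem m hr0 hrH⟩
        have hcs : pvLine m row = s.toList := by simp [pvLine, hs]
        rw [hcs] at hcL hany
        have hcol : ((col.toNat : Nat) : Int) = col := Int.toNat_of_nonneg hc0
        have hcln : col.toNat < s.toList.length := by omega
        have hfun : (fun (rc : Int × Int) (_ : Int) =>
            if (2 : Int) = 3 then updNorthA (pvFuel m) m rc.1 rc.2 rc.1 rc.2
            else if (2 : Int) = 0 then updEastA (pvFuel m) m rc.1 rc.2 rc.1 rc.2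
            else if (2 : Int) = 1 then updSouthA (pvFuel m) m rc.1 rc.2 rc.1 rc.2
            else if (2 : Int) = 2 then updWestA (pvFuel m) m rc.1 rc.2 rc.1 rc.2
            else rc) = (fun rc _ => updWestA (pvFuel m) m rc.1 rc.2 rc.1 rc.2) := by
          funext rc i; norm_num
        rw [if_pos (show (2 : Int) = 0 ∨ (2 : Int) = 2 by norm_num),
            if_neg (show ¬ (2 : Int) = 0 by norm_num), hcs,
            ← hcol, hfun,
            foldW m row s hs hany (PySem.List.pyRange 0 dist 1) col.toNat hcln, hlen,
            walk_eq_mwalk s.toList (pvNxtB s.toList) (specBa s.toList)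
              (fun c _ => specBa_lt _ hany c)
              (fun c hc => nxtB_tab _ (by intro hnil; rw [hnil] at hcln; simp at hcln) c hc)
              dist.toNat col.toNat hcln]
      · by_cases h1 : facing = 1
        · subst h1
          obtain ⟨hr0, hrH, hc0, _hcols, hany⟩ := hNS (Or.inl rfl)
          have hrow : ((row.toNat : Nat) : Int) = row := Int.toNat_of_nonneg hr0
          have hrn : row.toNat < m.length := by omega
          have hrn' : row.toNat < (pvColumn m col).length := by rw [pvColumn_len]; exact hrn
          have hfun : (fun (rc : Int × Int) (_ : Int) =>
              if (1 : Int) = 3 then updNorthA (pvFuel m) m rc.1 rc.2 rc.1 rc.2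
              else if (1 : Int) = 0 then updEastA (pvFuel m) m rc.1 rc.2 rc.1 rc.2
              else if (1 : Int) = 1 then updSouthA (pvFuel m) m rc.1 rc.2 rc.1 rc.2
              else if (1 : Int) = 2 then updWestA (pvFuel m) m rc.1 rc.2 rc.1 rc.2
              else rc) = (fun rc _ => updSouthA (pvFuel m) m rc.1 rc.2 rc.1 rc.2) := by
            funext rc i; norm_num
          rw [if_neg (show ¬ ((1 : Int) = 0 ∨ (1 : Int) = 2) by norm_num),
              if_pos (show (1 : Int) = 1 ∨ (1 : Int) = 3 by norm_num), if_pos rfl,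
              ← hrow, hfun,
              foldS m col hany (PySem.List.pyRange 0 dist 1) row.toNat hrn, hlen,
              walk_eq_mwalk (pvColumn m col) (pvNxtF (pvColumn m col)) (specFa (pvColumn m col))
                (fun c _ => specFa_lt _ hany c)
                (fun c hc => nxtF_tab _ (by intro hnil; rw [hnil] at hrn'; simp at hrn') c hc)
                dist.toNat row.toNat hrn']
        · by_cases h3 : facing = 3
          · subst h3
            obtain ⟨hr0, hrH, hc0, _hcols, hany⟩ := hNS (Or.inr rfl)
            have hrow : ((row.toNat : Nat) : Int) = row := Int.toNat_of_nonneg hr0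
            have hrn : row.toNat < m.length := by omega
            have hrn' : row.toNat < (pvColumn m col).length := by rw [pvColumn_len]; exact hrn
            have hfun : (fun (rc : Int × Int) (_ : Int) =>
                if (3 : Int) = 3 then updNorthA (pvFuel m) m rc.1 rc.2 rc.1 rc.2
                else if (3 : Int) = 0 then updEastA (pvFuel m) m rc.1 rc.2 rc.1 rc.2
                else if (3 : Int) = 1 then updSouthA (pvFuel m) m rc.1 rc.2 rc.1 rc.2
                else if (3 : Int) = 2 then updWestA (pvFuel m) m rc.1 rc.2 rc.1 rc.2
                else rc) = (fun rc _ => updNorthA (pvFuel m) m rc.1 rc.2 rc.1 rc.2) := by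
              funext rc i; norm_num
            rw [if_neg (show ¬ ((3 : Int) = 0 ∨ (3 : Int) = 2) by norm_num),
                if_pos (show (3 : Int) = 1 ∨ (3 : Int) = 3 by norm_num),
                if_neg (show ¬ (3 : Int) = 1 by norm_num),
                ← hrow, hfun,
                foldN m col hany (PySem.List.pyRange 0 dist 1) row.toNat hrn, hlen,
                walk_eq_mwalk (pvColumn m col) (pvNxtB (pvColumn m col)) (specBa (pvColumn m col))
                  (fun c _ => specBa_lt _ hany c)
                  (fun c hc => nxtB_tab _ (by intro hnil; rw [hnil] at hrn'; simp at hrn') c hc)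
                  dist.toNat row.toNat hrn']
          · have hfun : (fun (rc : Int × Int) (_ : Int) =>
                if facing = 3 then updNorthA (pvFuel m) m rc.1 rc.2 rc.1 rc.2
                else if facing = 0 then updEastA (pvFuel m) m rc.1 rc.2 rc.1 rc.2
                else if facing = 1 then updSouthA (pvFuel m) m rc.1 rc.2 rc.1 rc.2
                else if facing = 2 then updWestA (pvFuel m) m rc.1 rc.2 rc.1 rc.2
                else rc) = (fun rc _ => rc) := by
              funext rc i
              rw [if_neg h3, if_neg h0, if_neg h1, if_neg h2]
            rw [hfun, foldl_id,
                if_neg (show ¬ (facing = 0 ∨ facing = 2) by tauto),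
                if_neg (show ¬ (facing = 1 ∨ facing = 3) by tauto)]
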